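-- pv_equiv track=rewrite | github.com/mal1on/checkio-solutions | Incinerator/Power Supply.py | power_supply
-- ===== SOURCE A (Python) =====
-- def power_supply(network, power_plants):
--
--     supplied = []
--
--     for pp in power_plants:
--         if power_plants[pp] == 0:
--             tree = []
--         elif power_plants[pp] == 1:
--             tree = [[pp]] + [mult * [] for mult in range(power_plants[pp])]
--             for a, b in sorted(network, key=lambda con: pp in con, reverse=True):
--                 if a == pp:
--                     tree[1].append(b)
--                 if b == pp:
--                     tree[1].append(a)
--         else:
--             tree = [[pp]] + [mult * [] for mult in range(power_plants[pp])]
--             for depth in range(1, power_plants[pp]):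
--                 for a, b in sorted(network, key=lambda con: pp in con, reverse=True):
--                     if a == pp:
--                         tree[1].append(b)
--                     elif b == pp:
--                         tree[1].append(a)
--                     elif a in tree[depth] and b not in [i for l in tree[:depth] for i in l]:
--                         tree[depth + 1].append(b)
--                     elif b in tree[depth] and a not in [i for l in tree[:depth] for i in l]:
--                         tree[depth + 1].append(a)
--         supplied.append(
--             set([i for l in tree for i in l if i not in power_plants]))
--
--     return set([i for l in network for i in l if i not in [i for s in supplied for i in s] + list(power_plants.keys())])
-- ===== SOURCE B (Python) =====
-- def power_supply(network, power_plants):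
--     # Per-plant breadth-first search over a prebuilt adjacency dict with a
--     # visited set, instead of repeated sorted passes with list scans.
--     adj = {}
--     for a, b in network:
--         adj.setdefault(a, []).append(b)
--         adj.setdefault(b, []).append(a)
--     powered = set()
--     for pp, radius in power_plants.items():
--         visited = {pp}
--         frontier = [pp]
--         for _ in range(radius):
--             nxt = []
--             for u in frontier:
--                 for v in adj.get(u, []):
--                     if v not in visited:
--                         visited.add(v)
--                         nxt.append(v)
--             frontier = nxt
--         powered |= visited
--     return {i for a, b in network for i in (a, b)
--             if i not in powered and i not in power_plants}
-- ===== Notes on version B (the rewrite author's own statement) =====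
-- stated objective: faster
-- what changed: Replaces A's per-depth re-sorting of the whole edge list and per-edge linear scans of the flattened tree prefix by a single prebuilt adjacency dict and a per-plant breadth-first search with a visited set and frontier list. Pre_ only excludes association lists with duplicate plant keys, which the Python dict argument cannot represent.
import Mathlib
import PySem

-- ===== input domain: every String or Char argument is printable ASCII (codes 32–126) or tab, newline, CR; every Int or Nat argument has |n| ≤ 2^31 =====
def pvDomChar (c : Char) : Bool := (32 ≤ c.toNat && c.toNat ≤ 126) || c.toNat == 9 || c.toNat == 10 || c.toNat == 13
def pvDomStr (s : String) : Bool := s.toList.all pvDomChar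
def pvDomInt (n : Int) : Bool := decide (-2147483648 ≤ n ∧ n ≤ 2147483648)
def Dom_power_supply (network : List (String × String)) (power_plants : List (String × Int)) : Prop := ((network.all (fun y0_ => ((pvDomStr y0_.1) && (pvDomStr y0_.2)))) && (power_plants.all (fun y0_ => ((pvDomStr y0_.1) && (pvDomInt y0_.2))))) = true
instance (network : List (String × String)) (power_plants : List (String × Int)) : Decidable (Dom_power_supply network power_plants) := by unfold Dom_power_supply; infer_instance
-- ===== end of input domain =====

-- ===== PORT A =====
-- B replaces A's per-depth re-sorting and linear prefix scans by one adjacency dict and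
-- a per-plant breadth-first search (measured faster; objective: faster).

-- keys of the power_plants dict (list(power_plants.keys()))
def pvKeysA (power_plants : List (String × Int)) : List String :=
  power_plants.map (fun p => p.1)

-- sorted(network, key=lambda con: pp in con, reverse=True)
def pvSortedA (network : List (String × String)) (pp : String) : List (String × String) :=
  PySem.List.sorted network (fun con => (con.1 == pp || con.2 == pp)) true

-- one edge of the power_plants[pp] == 1 loop (two independent `if`s)
def pvStep1 (pp : String) (tree : List (List String)) (e : String × String) : List (List String) :=
  let t1 := if e.1 == pp then PySem.List.pySetD tree 1 (PySem.List.pyGetD tree 1 [] ++ [e.2]) else tree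
  if e.2 == pp then PySem.List.pySetD t1 1 (PySem.List.pyGetD t1 1 [] ++ [e.1]) else t1

-- [i for l in tree[:depth] for i in l]
def pvFlatPrefix (tree : List (List String)) (depth : Int) : List String :=
  (PySem.List.slice tree none (some depth)).flatten

-- one edge of the inner loop of the general (elif) branch
def pvStepD (pp : String) (depth : Int) (tree : List (List String)) (e : String × String) : List (List String) :=
  if e.1 == pp then
    PySem.List.pySetD tree 1 (PySem.List.pyGetD tree 1 [] ++ [e.2])
  else if e.2 == pp then
    PySem.List.pySetD tree 1 (PySem.List.pyGetD tree 1 [] ++ [e.1])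
  else if (PySem.List.pyGetD tree depth []).contains e.1 && !((pvFlatPrefix tree depth).contains e.2) then
    PySem.List.pySetD tree (depth + 1) (PySem.List.pyGetD tree (depth + 1) [] ++ [e.2])
  else if (PySem.List.pyGetD tree depth []).contains e.2 && !((pvFlatPrefix tree depth).contains e.1) then
    PySem.List.pySetD tree (depth + 1) (PySem.List.pyGetD tree (depth + 1) [] ++ [e.1])
  else tree

-- the whole `tree` computation for one plant pp of reach k
def pvTreeA (network : List (String × String)) (pp : String) (k : Int) : List (List String) :=
  if k == 0 then []
  else if k == 1 then
    (pvSortedA network pp).foldl (pvStep1 pp)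
      ([[pp]] ++ (PySem.List.pyRange 0 k 1).map (fun _ => ([] : List String)))
  else
    (PySem.List.pyRange 1 k 1).foldl
      (fun tree depth => (pvSortedA network pp).foldl (pvStepD pp depth) tree)
      ([[pp]] ++ (PySem.List.pyRange 0 k 1).map (fun _ => ([] : List String)))

def power_supply (network : List (String × String)) (power_plants : List (String × Int)) : List String :=
  -- `for pp in power_plants:` iterates the dict keys; power_plants[pp] is the dict lookup
  let supplied : List (PySem.Set String) :=
    (pvKeysA power_plants).foldl
      (fun acc pp =>
        acc ++ [PySem.Set.ofList
          ((pvTreeA network pp (PySem.Dict.getD ⟨power_plants⟩ pp 0)).flatten.filter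
            (fun i => !((pvKeysA power_plants).contains i)))])
      []
  PySem.Set.ofList
    ((network.flatMap (fun e => [e.1, e.2])).filter
      (fun i => !((supplied.flatten ++ pvKeysA power_plants).contains i)))

-- ===== PORT B =====

-- adjacency dict: adj.setdefault(a, []).append(b); adj.setdefault(b, []).append(a)
def pvAdjB (network : List (String × String)) : PySem.Dict String (List String) :=
  network.foldl
    (fun d e => (d.modify e.1 [] (fun l => l ++ [e.2])).modify e.2 [] (fun l => l ++ [e.1]))
    PySem.Dict.empty

-- per-plant depth-limited BFS: visited set + frontier list
def pvBfsB (adj : PySem.Dict String (List String)) (pp : String) (radius : Int) : PySem.Set String :=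
  ((PySem.List.pyRange 0 radius 1).foldl
    (fun vf _ =>
      vf.2.foldl
        (fun vf u =>
          (adj.getD u []).foldl
            (fun vf v =>
              if vf.1.contains v then vf else (PySem.Set.add vf.1 v, vf.2 ++ [v]))
            vf)
        (vf.1, ([] : List String)))
    (PySem.Set.ofList [pp], [pp])).1

def power_supply_alt (network : List (String × String)) (power_plants : List (String × Int)) : List String :=
  let adj := pvAdjB network
  let powered : PySem.Set String :=
    power_plants.foldl (fun pow pk => PySem.Set.union pow (pvBfsB adj pk.1 pk.2)) PySem.Set.empty
  PySem.Set.ofList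
    ((network.flatMap (fun e => [e.1, e.2])).filter
      (fun i => !(PySem.Set.contains powered i) && !(PySem.Dict.contains ⟨power_plants⟩ i)))

-- ===== PRECONDITION & SPEC =====
-- Pre_ excludes association lists with duplicate plant keys: the Python argument is a dict,
-- which cannot contain duplicate keys (the harness' dict(...) silently collapses them).
def Pre_power_supply (_network : List (String × String)) (power_plants : List (String × Int)) : Prop :=
  (power_plants.map (fun p => p.1)).Nodup
instance (network : List (String × String)) (power_plants : List (String × Int)) : Decidable (Pre_power_supply network power_plants) := by unfold Pre_power_supply; infer_instance

def pvWitness_power_supply : (List (String × String)) × (List (String × Int)) :=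
  ([("a", "b"), ("b", "c"), ("c", "d")], [("a", 2)])

def Spec_power_supply (network : List (String × String)) (power_plants : List (String × Int)) (out : List String) : Prop := out = power_supply_alt network power_plants
instance (network : List (String × String)) (power_plants : List (String × Int)) (out : List String) : Decidable (Spec_power_supply network power_plants out) := by unfold Spec_power_supply; infer_instance

-- ===== CLAIM (what is proved, stated in full; the proofs are below) =====
def Claim_equal_power_supply : Prop := ∀ (network : List (String × String)) (power_plants : List (String × Int)), Dom_power_supply network power_plants → Pre_power_supply network power_plants → Spec_power_supply network power_plants (power_supply network power_plants)

-- ===== LEMMAS AND PROOFS =====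


-- reachability predicates used only by the proofs

def pvAdjRel (network : List (String × String)) (u v : String) : Prop :=
  (u, v) ∈ network ∨ (v, u) ∈ network

def pvBall (network : List (String × String)) (pp : String) : Nat → String → Prop
  | 0 => fun i => i = pp
  | n + 1 => fun i =>
      pvBall network pp n i ∨ ∃ j, pvBall network pp n j ∧ pvAdjRel network j i

lemma pvBall_mono {network pp} {m n : Nat} (h : m ≤ n) {i} :
    pvBall network pp m i → pvBall network pp n i := by
  induction n with
  | zero => intro hb; have hm : m = 0 := Nat.le_zero.mp h; subst hm; exact hb
  | succ n ih =>
    intro hb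
    rcases Nat.lt_or_ge m (n + 1) with hlt | hge
    · exact Or.inl (ih (Nat.lt_succ_iff.mp hlt) hb)
    · have hm : m = n + 1 := le_antisymm h hge
      subst hm; exact hb

-- which plants can reach node i (the common semantics of both ports)
def pvReached (network : List (String × String)) (power_plants : List (String × Int)) (i : String) : Prop :=
  ∃ pk ∈ power_plants, pvBall network pk.1 pk.2.toNat i

-- ---------- B-side lemmas ----------

lemma pvAdjB_mem (network : List (String × String)) (u v : String) :
    v ∈ (pvAdjB network).getD u [] ↔ pvAdjRel network u v := by
  have key : ∀ (net : List (String × String)) (d : PySem.Dict String (List String)),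
      v ∈ (net.foldl (fun d e => (d.modify e.1 [] (fun l => l ++ [e.2])).modify e.2 [] (fun l => l ++ [e.1])) d).getD u []
        ↔ v ∈ d.getD u [] ∨ (u, v) ∈ net ∨ (v, u) ∈ net := by
    intro net
    induction net with
    | nil => intro d; simp
    | cons e es ih =>
      intro d
      simp only [List.foldl_cons]
      rw [ih]
      have hstep : v ∈ ((d.modify e.1 [] (fun l => l ++ [e.2])).modify e.2 [] (fun l => l ++ [e.1])).getD u []
          ↔ v ∈ d.getD u [] ∨ (u = e.1 ∧ v = e.2) ∨ (u = e.2 ∧ v = e.1) := by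
        by_cases h2 : u = e.2
        · rw [h2, PySem.Dict.getD_modify_self]
          by_cases h1 : e.2 = e.1
          · rw [h1, PySem.Dict.getD_modify_self]
            simp only [List.mem_append, List.mem_singleton]
            constructor
            · rintro ((h | h) | h) <;> simp_all
            · rintro (h | ⟨he, h⟩ | ⟨he, h⟩) <;> simp_all
          · rw [PySem.Dict.getD_modify_of_ne _ _ _ h1]
            simp only [List.mem_append, List.mem_singleton]
            constructor
            · rintro (h | h) <;> simp_all
            · rintro (h | ⟨he, h⟩ | ⟨he, h⟩) <;> simp_all
        · rw [PySem.Dict.getD_modify_of_ne _ _ _ h2]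
          by_cases h1 : u = e.1
          · rw [h1, PySem.Dict.getD_modify_self]
            simp only [List.mem_append, List.mem_singleton]
            constructor
            · rintro (h | h) <;> simp_all
            · rintro (h | ⟨he, h⟩ | ⟨he, h⟩) <;> simp_all
          · rw [PySem.Dict.getD_modify_of_ne _ _ _ h1]
            constructor
            · exact fun h => Or.inl h
            · rintro (h | ⟨he, h⟩ | ⟨he, h⟩)
              · exact h
              · exact absurd he h1
              · exact absurd he h2
      rw [hstep]
      simp only [List.mem_cons, Prod.ext_iff]
      tauto
  rw [pvAdjB, key, pvAdjRel]
  simp [PySem.Dict.getD, PySem.Dict.get?, PySem.Dict.empty]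

lemma pvBfsInner (vs : List String) (vf : PySem.Set String × List String) :
    (∀ i, i ∈ (vs.foldl (fun vf v => if vf.1.contains v then vf else (PySem.Set.add vf.1 v, vf.2 ++ [v])) vf).1
        ↔ i ∈ vf.1 ∨ i ∈ vs) ∧
    (∀ i, i ∈ (vs.foldl (fun vf v => if vf.1.contains v then vf else (PySem.Set.add vf.1 v, vf.2 ++ [v])) vf).2
        ↔ i ∈ vf.2 ∨ (i ∈ vs ∧ i ∉ vf.1)) := by
  induction vs generalizing vf with
  | nil => simp
  | cons v vs ih =>
    simp only [List.foldl_cons]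
    by_cases hv : v ∈ vf.1
    · rw [if_pos ((PySem.Set.contains_iff _ _).mpr hv)]
      obtain ⟨ih1, ih2⟩ := ih vf
      have hv' : ∀ j : String, j = v → j ∈ vf.1 := fun j h => h ▸ hv
      refine ⟨fun i => ?_, fun i => ?_⟩
      · rw [ih1]; simp only [List.mem_cons]
        constructor
        · tauto
        · rintro (h | h | h) <;> [exact Or.inl h; exact Or.inl (hv' i h); exact Or.inr h]
      · rw [ih2]; simp only [List.mem_cons]
        constructor
        · tauto
        · rintro (h | ⟨h1 | h1, h2⟩)
          · exact Or.inl h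
          · exact absurd (hv' i h1) h2
          · exact Or.inr ⟨h1, h2⟩
    · rw [if_neg (fun hc => hv ((PySem.Set.contains_iff _ _).mp hc))]
      obtain ⟨ih1, ih2⟩ := ih (PySem.Set.add vf.1 v, vf.2 ++ [v])
      refine ⟨fun i => ?_, fun i => ?_⟩
      · rw [ih1]
        simp only [PySem.Set.mem_add, List.mem_cons]
        tauto
      · rw [ih2]
        simp only [PySem.Set.mem_add, List.mem_append, List.mem_cons,
          List.not_mem_nil, or_false]
        constructor
        · rintro ((h | h) | ⟨h1, h2⟩)
          · exact Or.inl h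
          · exact Or.inr ⟨Or.inl h, h ▸ hv⟩
          · exact Or.inr ⟨Or.inr h1, fun hm => h2 (Or.inl hm)⟩
        · rintro (h | ⟨h1 | h1, h2⟩)
          · exact Or.inl (Or.inl h)
          · exact Or.inl (Or.inr h1)
          · by_cases hiv : i = v
            · exact Or.inl (Or.inr hiv)
            · exact Or.inr ⟨h1, fun hm => (hm.elim h2 hiv)⟩

lemma pvBfsRound (g : String → List String) (fr : List String) (vf : PySem.Set String × List String) :
    (∀ i, i ∈ (fr.foldl (fun vf u => (g u).foldl (fun vf v => if vf.1.contains v then vf else (PySem.Set.add vf.1 v, vf.2 ++ [v])) vf) vf).1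
        ↔ i ∈ vf.1 ∨ ∃ u ∈ fr, i ∈ g u) ∧
    (∀ i, i ∈ (fr.foldl (fun vf u => (g u).foldl (fun vf v => if vf.1.contains v then vf else (PySem.Set.add vf.1 v, vf.2 ++ [v])) vf) vf).2
        ↔ i ∈ vf.2 ∨ ((∃ u ∈ fr, i ∈ g u) ∧ i ∉ vf.1)) := by
  induction fr generalizing vf with
  | nil => simp
  | cons u fr ih =>
    simp only [List.foldl_cons]
    obtain ⟨in1, in2⟩ := pvBfsInner (g u) vf
    obtain ⟨ih1, ih2⟩ := ih ((g u).foldl (fun vf v => if vf.1.contains v then vf else (PySem.Set.add vf.1 v, vf.2 ++ [v])) vf)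
    refine ⟨fun i => ?_, fun i => ?_⟩
    · rw [ih1, in1]
      simp only [List.mem_cons]
      constructor
      · rintro ((h | h) | ⟨w, hw, hm⟩)
        · exact Or.inl h
        · exact Or.inr ⟨u, Or.inl rfl, h⟩
        · exact Or.inr ⟨w, Or.inr hw, hm⟩
      · rintro (h | ⟨w, (rfl | hw), hm⟩)
        · exact Or.inl (Or.inl h)
        · exact Or.inl (Or.inr hm)
        · exact Or.inr ⟨w, hw, hm⟩
    · rw [ih2, in2, in1]
      simp only [List.mem_cons]
      constructor
      · rintro ((h | ⟨h1, h2⟩) | ⟨⟨w, hw, hm⟩, h2⟩)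
        · exact Or.inl h
        · exact Or.inr ⟨⟨u, Or.inl rfl, h1⟩, h2⟩
        · exact Or.inr ⟨⟨w, Or.inr hw, hm⟩, fun hv => h2 (Or.inl hv)⟩
      · rintro (h | ⟨⟨w, (rfl | hw), hm⟩, h2⟩)
        · exact Or.inl (Or.inl h)
        · exact Or.inl (Or.inr ⟨hm, h2⟩)
        · by_cases hgu : i ∈ g u
          · exact Or.inl (Or.inr ⟨hgu, h2⟩)
          · exact Or.inr ⟨⟨w, hw, hm⟩, fun hv => (hv.elim h2 hgu)⟩

lemma pvFoldl_const {α β : Type} (l : List α) (f : β → β) (init : β) :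
    l.foldl (fun s _ => f s) init = f^[l.length] init := by
  induction l generalizing init with
  | nil => rfl
  | cons x xs ih =>
    simp only [List.foldl_cons, ih, List.length_cons, Function.iterate_succ_apply]

def pvRound (g : String → List String) (vf : PySem.Set String × List String) :
    PySem.Set String × List String :=
  vf.2.foldl
    (fun vf u => (g u).foldl (fun vf v => if vf.1.contains v then vf else (PySem.Set.add vf.1 v, vf.2 ++ [v])) vf)
    (vf.1, ([] : List String))

lemma pvBfsInv (network : List (String × String)) (pp : String) (t : Nat) :
    (∀ i, i ∈ ((pvRound (fun u => (pvAdjB network).getD u []))^[t] (PySem.Set.ofList [pp], [pp])).1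
        ↔ pvBall network pp t i) ∧
    (∀ u ∈ ((pvRound (fun u => (pvAdjB network).getD u []))^[t] (PySem.Set.ofList [pp], [pp])).2,
        pvBall network pp t u) ∧
    (∀ i, pvBall network pp t i →
        i ∈ ((pvRound (fun u => (pvAdjB network).getD u []))^[t] (PySem.Set.ofList [pp], [pp])).2
        ∨ ∃ s, s < t ∧ pvBall network pp s i) := by
  induction t with
  | zero =>
    refine ⟨fun i => ?_, fun u hu => ?_, fun i hb => ?_⟩
    · simp [pvBall, PySem.Set.mem_ofList]
    · simp only [Function.iterate_zero, id] at hu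
      rcases List.mem_singleton.mp hu with rfl
      exact rfl
    · exact Or.inl (by simpa using (show i = pp from hb))
  | succ t ih =>
    obtain ⟨ih1, ih2, ih3⟩ := ih
    set F := pvRound (fun u => (pvAdjB network).getD u []) with hF
    set P := F^[t] (PySem.Set.ofList [pp], [pp]) with hP
    have hiter : F^[t + 1] (PySem.Set.ofList [pp], [pp]) = F P := by
      rw [Function.iterate_succ_apply']
    obtain ⟨r1, r2⟩ := pvBfsRound (fun u => (pvAdjB network).getD u []) P.2 (P.1, [])
    have hmem1 : ∀ i, i ∈ (F P).1 ↔ pvBall network pp t i ∨ ∃ u ∈ P.2, pvAdjRel network u i := by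
      intro i
      rw [hF, pvRound, r1, ih1]
      constructor
      · rintro (h | ⟨u, hu, hm⟩)
        · exact Or.inl h
        · exact Or.inr ⟨u, hu, (pvAdjB_mem network u i).mp hm⟩
      · rintro (h | ⟨u, hu, hm⟩)
        · exact Or.inl h
        · exact Or.inr ⟨u, hu, (pvAdjB_mem network u i).mpr hm⟩
    have hball : ∀ i, (pvBall network pp t i ∨ ∃ u ∈ P.2, pvAdjRel network u i) ↔ pvBall network pp (t + 1) i := by
      intro i
      constructor
      · rintro (h | ⟨u, hu, hm⟩)
        · exact Or.inl h
        · exact Or.inr ⟨u, ih2 u hu, hm⟩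
      · rintro (h | ⟨j, hj, hm⟩)
        · exact Or.inl h
        · rcases ih3 j hj with hfr | ⟨m, hmt, hbm⟩
          · exact Or.inr ⟨j, hfr, hm⟩
          · exact Or.inl (pvBall_mono (Nat.succ_le_of_lt hmt) (Or.inr ⟨j, hbm, hm⟩))
    refine ⟨fun i => ?_, fun u hu => ?_, fun i hb => ?_⟩
    · rw [hiter, hmem1, hball]
    · rw [hiter] at hu
      have : u ∈ (F P).2 := hu
      rw [hF, pvRound, r2] at this
      rcases this with h | ⟨⟨w, hw, hm⟩, _⟩
      · exact absurd h (List.not_mem_nil)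
      · exact (hball u).mp (Or.inr ⟨w, hw, (pvAdjB_mem network w u).mp hm⟩)
    · rw [hiter]
      by_cases hbt : pvBall network pp t i
      · exact Or.inr ⟨t, Nat.lt_succ_self t, hbt⟩
      · rcases ((hball i).mpr hb) with h | ⟨j, hj, hm⟩
        · exact absurd h hbt
        · left
          rw [hF, pvRound, r2]
          refine Or.inr ⟨⟨j, hj, (pvAdjB_mem network j i).mpr hm⟩, ?_⟩
          rw [ih1]; exact hbt

lemma pvBfsB_mem (network : List (String × String)) (pp : String) (radius : Int) (i : String) :
    i ∈ pvBfsB (pvAdjB network) pp radius ↔ pvBall network pp radius.toNat i := by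
  have hfold := pvFoldl_const (PySem.List.pyRange 0 radius 1)
    (pvRound (fun u => (pvAdjB network).getD u [])) (PySem.Set.ofList [pp], [pp])
  have hlen : (PySem.List.pyRange 0 radius 1).length = radius.toNat := by
    simp [PySem.List.length_pyRange_one]
  rw [pvBfsB]
  change i ∈ ((PySem.List.pyRange 0 radius 1).foldl
      (fun s _ => pvRound (fun u => (pvAdjB network).getD u []) s)
      (PySem.Set.ofList [pp], [pp])).1 ↔ _
  rw [hfold, hlen]
  exact (pvBfsInv network pp radius.toNat).1 i

lemma pvPowered_mem (network : List (String × String)) (power_plants : List (String × Int)) (i : String) :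
    i ∈ power_plants.foldl (fun pow pk => PySem.Set.union pow (pvBfsB (pvAdjB network) pk.1 pk.2)) PySem.Set.empty
      ↔ pvReached network power_plants i := by
  have key : ∀ (pps : List (String × Int)) (acc : PySem.Set String),
      i ∈ pps.foldl (fun pow pk => PySem.Set.union pow (pvBfsB (pvAdjB network) pk.1 pk.2)) acc
        ↔ i ∈ acc ∨ ∃ pk ∈ pps, pvBall network pk.1 pk.2.toNat i := by
    intro pps
    induction pps with
    | nil => intro acc; simp
    | cons pk rest ih =>
      intro acc
      simp only [List.foldl_cons]
      rw [ih]
      rw [PySem.Set.mem_union]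
      rw [pvBfsB_mem network pk.1 pk.2 i]
      simp only [List.mem_cons]
      constructor
      · rintro ((h | h) | ⟨q, hq, hb⟩)
        · exact Or.inl h
        · exact Or.inr ⟨pk, Or.inl rfl, h⟩
        · exact Or.inr ⟨q, Or.inr hq, hb⟩
      · rintro (h | ⟨q, (rfl | hq), hb⟩)
        · exact Or.inl (Or.inl h)
        · exact Or.inl (Or.inr hb)
        · exact Or.inr ⟨q, hq, hb⟩
  rw [key]
  simp [pvReached, PySem.Set.empty]

-- ---------- A-side lemmas ----------

-- the stable reverse sort by the Boolean key `pp in con` puts exactly the pp-edges first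
lemma pvSorted_split (network : List (String × String)) (pp : String) :
    ∃ u v, pvSortedA network pp = u ++ v ∧
      (∀ e ∈ u, e.1 = pp ∨ e.2 = pp) ∧ (∀ e ∈ v, e.1 ≠ pp ∧ e.2 ≠ pp) := by
  classical
  set key : (String × String) → Bool := fun con => (con.1 == pp || con.2 == pp) with hkey
  set l := pvSortedA network pp with hl
  have hp : l.Pairwise (fun a b => key b ≤ key a) := PySem.List.sorted_pairwise_rev network key
  refine ⟨l.takeWhile key, l.dropWhile key, (List.takeWhile_append_dropWhile).symm, ?_, ?_⟩
  · intro e he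
    have := List.mem_takeWhile_imp he
    rw [hkey] at this
    simpa using this
  · intro e he
    have hfalse : key e = false := by
      rcases hd : l.dropWhile key with _ | ⟨h0, t⟩
      · rw [hd] at he; cases he
      · have hh : key h0 = false := by
          have w : l.dropWhile key ≠ [] := by rw [hd]; simp
          have hhead := List.head_dropWhile_not key w
          have he' : (l.dropWhile key).head w = h0 := by simp [hd]
          rw [he'] at hhead; exact hhead
        rw [hd] at he
        rcases List.mem_cons.mp he with rfl | he'
        · exact hh
        · have hpv : (l.dropWhile key).Pairwise (fun a b => key b ≤ key a) :=
            hp.sublist (List.dropWhile_sublist key)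
          rw [hd, List.pairwise_cons] at hpv
          have hle := hpv.1 e he'
          rw [hh] at hle
          cases hke : key e
          · rfl
          · rw [hke] at hle; exact absurd hle (by decide)
    rw [hkey] at hfalse
    simp only [Bool.or_eq_false_iff, beq_eq_false_iff_ne, ne_eq] at hfalse
    exact hfalse

lemma pvGetD1 (A B : List String) : PySem.List.pyGetD [A, B] 1 [] = B := by
  rw [PySem.List.pyGetD_ofNat']; rfl

lemma pvSetD1 (A B X : List String) : PySem.List.pySetD [A, B] 1 X = [A, X] := by
  rw [show (1 : Int) = ((1 : Nat) : Int) from rfl, PySem.List.pySetD_natCast]; rfl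

lemma pvStep1_fold (pp : String) (es : List (String × String)) :
    ∀ L : List String, ∃ L', es.foldl (pvStep1 pp) [[pp], L] = [[pp], L'] ∧
      (∀ i, i ∈ L' ↔ i ∈ L ∨ ∃ e ∈ es, (e.1 = pp ∧ i = e.2) ∨ (e.2 = pp ∧ i = e.1)) := by
  induction es with
  | nil => intro L; exact ⟨L, rfl, by simp⟩
  | cons e es ih =>
    intro L
    have hstep : pvStep1 pp [[pp], L] e =
        [[pp], L ++ (if e.1 = pp then [e.2] else []) ++ (if e.2 = pp then [e.1] else [])] := by
      by_cases h1 : e.1 = pp <;> by_cases h2 : e.2 = pp <;>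
        simp [pvStep1, pvGetD1, pvSetD1, h1, h2]
    simp only [List.foldl_cons, hstep]
    obtain ⟨L', hL', hmem⟩ := ih (L ++ (if e.1 = pp then [e.2] else []) ++ (if e.2 = pp then [e.1] else []))
    refine ⟨L', hL', fun i => ?_⟩
    rw [hmem i]
    simp only [List.mem_append, List.mem_cons]
    constructor
    · rintro ((h | h) | ⟨f, hf, hc⟩)
      · rcases h with h | h
        · exact Or.inl h
        · by_cases h1 : e.1 = pp
          · rw [if_pos h1] at h
            exact Or.inr ⟨e, Or.inl rfl, Or.inl ⟨h1, List.mem_singleton.mp h⟩⟩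
          · rw [if_neg h1] at h; cases h
      · by_cases h2 : e.2 = pp
        · rw [if_pos h2] at h
          exact Or.inr ⟨e, Or.inl rfl, Or.inr ⟨h2, List.mem_singleton.mp h⟩⟩
        · rw [if_neg h2] at h; cases h
      · exact Or.inr ⟨f, Or.inr hf, hc⟩
    · rintro (h | ⟨f, (rfl | hf), hc⟩)
      · exact Or.inl (Or.inl (Or.inl h))
      · rcases hc with ⟨hfp, rfl⟩ | ⟨hfp, rfl⟩
        · exact Or.inl (Or.inl (Or.inr (by rw [if_pos hfp]; exact List.mem_singleton.mpr rfl)))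
        · exact Or.inl (Or.inr (by rw [if_pos hfp]; exact List.mem_singleton.mpr rfl))
      · exact Or.inr ⟨f, hf, hc⟩

lemma pvGetD_set_self (T : List (List String)) (n : Nat) (X : List String) (h : n < T.length) :
    (T.set n X).getD n [] = X := by
  rw [List.getD_eq_getElem _ _ (by simpa using h), List.getElem_set_self]

lemma pvGetD_set_ne (T : List (List String)) (n m : Nat) (X : List String) (h : n ≠ m) :
    (T.set n X).getD m [] = T.getD m [] := by
  simp [List.getD, List.getElem?_set_ne h]

lemma pvMem_take_flatten (T : List (List String)) (d : Nat) (i : String) :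
    i ∈ (T.take d).flatten ↔ ∃ j, j < d ∧ i ∈ T.getD j [] := by
  induction T generalizing d with
  | nil => simp [List.getD]
  | cons l ls ih =>
    cases d with
    | zero => simp
    | succ d =>
      simp only [List.take_succ_cons, List.flatten_cons, List.mem_append]
      rw [ih d]
      constructor
      · rintro (h | ⟨j, hj, hm⟩)
        · exact ⟨0, Nat.succ_pos d, h⟩
        · exact ⟨j + 1, Nat.succ_lt_succ hj, hm⟩
      · rintro ⟨j, hj, hm⟩
        cases j with
        | zero => exact Or.inl hm
        | succ j => exact Or.inr ⟨j, Nat.lt_of_succ_lt_succ hj, hm⟩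

lemma pvFlatPrefix_natCast (T : List (List String)) (d : Nat) :
    pvFlatPrefix T (d : Int) = (T.take d).flatten := by
  rw [pvFlatPrefix, PySem.List.slice_to T (by exact_mod_cast Nat.zero_le d)]
  rw [Int.toNat_natCast]

lemma pvCast_succ (d : Nat) : ((d : Int) + 1) = ((d + 1 : Nat) : Int) := by push_cast; ring

lemma pvStepD_eval_pp (pp : String) (d : Nat) (T : List (List String)) (e : String × String)
    (he : e.1 = pp ∨ e.2 = pp) :
    pvStepD pp (d : Int) T e = T.set 1 (T.getD 1 [] ++ [if e.1 = pp then e.2 else e.1]) := by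
  by_cases h1 : e.1 = pp
  · rw [pvStepD, if_pos (by simpa using h1), if_pos h1]
    rw [show (1 : Int) = ((1 : Nat) : Int) from rfl, PySem.List.pyGetD_natCast, PySem.List.pySetD_natCast]
  · have h2 : e.2 = pp := he.resolve_left h1
    rw [pvStepD, if_neg (by simpa using h1), if_pos (by simpa using h2), if_neg h1]
    rw [show (1 : Int) = ((1 : Nat) : Int) from rfl, PySem.List.pyGetD_natCast, PySem.List.pySetD_natCast]

lemma pvStepD_eval_nonpp (pp : String) (d : Nat) (T : List (List String)) (e : String × String)
    (h1 : e.1 ≠ pp) (h2 : e.2 ≠ pp) :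
    pvStepD pp (d : Int) T e =
      if e.1 ∈ T.getD d [] ∧ e.2 ∉ (T.take d).flatten then
        T.set (d + 1) (T.getD (d + 1) [] ++ [e.2])
      else if e.2 ∈ T.getD d [] ∧ e.1 ∉ (T.take d).flatten then
        T.set (d + 1) (T.getD (d + 1) [] ++ [e.1])
      else T := by
  rw [pvStepD, if_neg (by simpa using h1), if_neg (by simpa using h2)]
  simp only [pvCast_succ, PySem.List.pyGetD_natCast, PySem.List.pySetD_natCast, pvFlatPrefix_natCast]
  have hbool : ∀ (x y : String) , ((T.getD d []).contains x && !((T.take d).flatten).contains y) = true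
      ↔ (x ∈ T.getD d [] ∧ y ∉ (T.take d).flatten) := by
    intro x y
    rw [Bool.and_eq_true, Bool.not_eq_true']
    constructor
    · rintro ⟨a, b⟩
      exact ⟨List.contains_iff_mem.mp a, fun hm => by rw [List.contains_iff_mem.mpr hm] at b; cases b⟩
    · rintro ⟨a, b⟩
      refine ⟨List.contains_iff_mem.mpr a, ?_⟩
      rw [Bool.eq_false_iff]
      intro hbb
      exact b (List.contains_iff_mem.mp hbb)
  by_cases hc1 : e.1 ∈ T.getD d [] ∧ e.2 ∉ (T.take d).flatten
  · rw [if_pos ((hbool e.1 e.2).mpr hc1), if_pos hc1]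
  · rw [if_neg (fun hb => hc1 ((hbool e.1 e.2).mp hb)), if_neg hc1]
    by_cases hc2 : e.2 ∈ T.getD d [] ∧ e.1 ∉ (T.take d).flatten
    · rw [if_pos ((hbool e.2 e.1).mpr hc2), if_pos hc2]
    · rw [if_neg (fun hb => hc2 ((hbool e.2 e.1).mp hb)), if_neg hc2]

-- fold of pvStepD over edges that all touch pp: only tree[1] grows, by partners
lemma pvStepD_fold_pp (pp : String) (d : Nat) (_hd : 1 ≤ d) (es : List (String × String))
    (hes : ∀ e ∈ es, e.1 = pp ∨ e.2 = pp) :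
    ∀ T : List (List String), 1 < T.length → ∃ ext,
      es.foldl (pvStepD pp (d : Int)) T = T.set 1 (T.getD 1 [] ++ ext) ∧
      (∀ i, i ∈ ext ↔ ∃ e ∈ es, (e.1 = pp ∧ i = e.2) ∨ (e.1 ≠ pp ∧ e.2 = pp ∧ i = e.1)) := by
  induction es with
  | nil =>
    intro T hT1
    refine ⟨[], ?_, by simp⟩
    simp only [List.foldl_nil, List.append_nil]
    rw [List.getD_eq_getElem _ _ (by simpa using hT1)]
    exact (List.set_getElem_self (by simpa using hT1)).symm
  | cons e es ih =>
    intro T hT1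
    have he := hes e (List.mem_cons_self)
    have hstep := pvStepD_eval_pp pp d T e he
    simp only [List.foldl_cons, hstep]
    obtain ⟨ext', hfold, hmem⟩ := ih (fun f hf => hes f (List.mem_cons_of_mem _ hf))
      (T.set 1 (T.getD 1 [] ++ [if e.1 = pp then e.2 else e.1])) (by simpa using hT1)
    refine ⟨(if e.1 = pp then e.2 else e.1) :: ext', ?_, ?_⟩
    · rw [hfold, pvGetD_set_self _ _ _ hT1, List.set_set]
      simp
    · intro i
      simp only [List.mem_cons]
      constructor
      · rintro (h | h)
        · by_cases h1 : e.1 = pp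
          · exact ⟨e, Or.inl rfl, Or.inl ⟨h1, by rwa [if_pos h1] at h⟩⟩
          · exact ⟨e, Or.inl rfl, Or.inr ⟨h1, he.resolve_left h1, by rwa [if_neg h1] at h⟩⟩
        · obtain ⟨f, hf, hc⟩ := (hmem i).mp h
          exact ⟨f, Or.inr hf, hc⟩
      · rintro ⟨f, (rfl | hf'), hc⟩
        · rcases hc with ⟨h1, hi⟩ | ⟨h1, h2, hi⟩
          · exact Or.inl (by rw [if_pos h1]; exact hi)
          · exact Or.inl (by rw [if_neg h1]; exact hi)
        · exact Or.inr ((hmem i).mpr ⟨f, hf', hc⟩)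

-- fold of pvStepD over edges not touching pp: only tree[d+1] grows, reads are constant
lemma pvStepD_fold_nonpp (pp : String) (d : Nat) (_hd : 1 ≤ d) (es : List (String × String))
    (hes : ∀ e ∈ es, e.1 ≠ pp ∧ e.2 ≠ pp) :
    ∀ T : List (List String), d + 1 < T.length → ∃ ext,
      es.foldl (pvStepD pp (d : Int)) T = T.set (d + 1) (T.getD (d + 1) [] ++ ext) ∧
      (∀ i, i ∈ ext ↔ ∃ e ∈ es,
        (e.1 ∈ T.getD d [] ∧ e.2 ∉ (T.take d).flatten ∧ i = e.2) ∨
        (¬(e.1 ∈ T.getD d [] ∧ e.2 ∉ (T.take d).flatten) ∧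
          e.2 ∈ T.getD d [] ∧ e.1 ∉ (T.take d).flatten ∧ i = e.1)) := by
  induction es with
  | nil =>
    intro T hT
    refine ⟨[], ?_, by simp⟩
    simp only [List.foldl_nil, List.append_nil]
    rw [List.getD_eq_getElem _ _ (by simpa using hT)]
    exact (List.set_getElem_self (by simpa using hT)).symm
  | cons e es ih =>
    intro T hT
    obtain ⟨h1, h2⟩ := hes e (List.mem_cons_self)
    have hstep := pvStepD_eval_nonpp pp d T e h1 h2
    simp only [List.foldl_cons, hstep]
    have hes' := fun f hf => hes f (List.mem_cons_of_mem _ hf)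
    by_cases hc1 : e.1 ∈ T.getD d [] ∧ e.2 ∉ (T.take d).flatten
    · rw [if_pos hc1]
      obtain ⟨ext', hfold, hmem⟩ := ih hes' (T.set (d + 1) (T.getD (d + 1) [] ++ [e.2])) (by simpa using hT)
      have hgd : (T.set (d + 1) (T.getD (d + 1) [] ++ [e.2])).getD d [] = T.getD d [] :=
        pvGetD_set_ne _ _ _ _ (by omega)
      have htk : (T.set (d + 1) (T.getD (d + 1) [] ++ [e.2])).take d = T.take d :=
        List.take_set_of_le (by omega)
      rw [hgd, htk] at hmem
      refine ⟨e.2 :: ext', ?_, ?_⟩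
      · rw [hfold, pvGetD_set_self _ _ _ (by simpa using hT), List.set_set]
        simp
      · intro i
        simp only [List.mem_cons]
        constructor
        · rintro (rfl | h)
          · exact ⟨e, Or.inl rfl, Or.inl ⟨hc1.1, hc1.2, rfl⟩⟩
          · obtain ⟨f, hf, hc⟩ := (hmem i).mp h
            exact ⟨f, Or.inr hf, hc⟩
        · rintro ⟨f, (rfl | hf'), hc⟩
          · rcases hc with ⟨_, _, hi⟩ | ⟨hn, _⟩
            · exact Or.inl hi
            · exact absurd hc1 hn
          · exact Or.inr ((hmem i).mpr ⟨f, hf', hc⟩)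
    · rw [if_neg hc1]
      by_cases hc2 : e.2 ∈ T.getD d [] ∧ e.1 ∉ (T.take d).flatten
      · rw [if_pos hc2]
        obtain ⟨ext', hfold, hmem⟩ := ih hes' (T.set (d + 1) (T.getD (d + 1) [] ++ [e.1])) (by simpa using hT)
        have hgd : (T.set (d + 1) (T.getD (d + 1) [] ++ [e.1])).getD d [] = T.getD d [] :=
          pvGetD_set_ne _ _ _ _ (by omega)
        have htk : (T.set (d + 1) (T.getD (d + 1) [] ++ [e.1])).take d = T.take d :=
          List.take_set_of_le (by omega)
        rw [hgd, htk] at hmem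
        refine ⟨e.1 :: ext', ?_, ?_⟩
        · rw [hfold, pvGetD_set_self _ _ _ (by simpa using hT), List.set_set]
          simp
        · intro i
          simp only [List.mem_cons]
          constructor
          · rintro (rfl | h)
            · exact ⟨e, Or.inl rfl, Or.inr ⟨hc1, hc2.1, hc2.2, rfl⟩⟩
            · obtain ⟨f, hf, hc⟩ := (hmem i).mp h
              exact ⟨f, Or.inr hf, hc⟩
          · rintro ⟨f, (rfl | hf'), hc⟩
            · rcases hc with ⟨ha, hb, hi⟩ | ⟨_, _, _, hi⟩
              · exact absurd ⟨ha, hb⟩ hc1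
              · exact Or.inl hi
            · exact Or.inr ((hmem i).mpr ⟨f, hf', hc⟩)
      · rw [if_neg hc2]
        obtain ⟨ext', hfold, hmem⟩ := ih hes' T hT
        refine ⟨ext', hfold, fun i => ?_⟩
        rw [hmem i]
        simp only [List.mem_cons]
        constructor
        · rintro ⟨f, hf, hc⟩
          exact ⟨f, Or.inr hf, hc⟩
        · rintro ⟨f, (rfl | hf'), hc⟩
          · rcases hc with ⟨ha, hb, _⟩ | ⟨_, ha, hb, _⟩
            · exact absurd ⟨ha, hb⟩ hc1
            · exact absurd ⟨ha, hb⟩ hc2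
          · exact ⟨f, hf', hc⟩

lemma pvMem_flatten_getD (T : List (List String)) (i : String) :
    i ∈ T.flatten ↔ ∃ j, i ∈ T.getD j [] := by
  have := pvMem_take_flatten T T.length i
  rw [List.take_length] at this
  rw [this]
  constructor
  · rintro ⟨j, _, hm⟩; exact ⟨j, hm⟩
  · rintro ⟨j, hm⟩
    refine ⟨j, ?_, hm⟩
    by_contra hj
    rw [List.getD_eq_getElem?_getD, List.getElem?_eq_none (by omega)] at hm
    cases hm

-- all partner-edges of pp land in the u-part of the split, and give exactly the neighbours
lemma pvTouch_iff (network : List (String × String)) (pp : String)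
    (u v : List (String × String)) (hs : pvSortedA network pp = u ++ v)
    (_hu : ∀ e ∈ u, e.1 = pp ∨ e.2 = pp) (hv : ∀ e ∈ v, e.1 ≠ pp ∧ e.2 ≠ pp) (i : String) :
    (∃ e ∈ u, (e.1 = pp ∧ i = e.2) ∨ (e.1 ≠ pp ∧ e.2 = pp ∧ i = e.1)) ↔ pvAdjRel network pp i := by
  have hmemuv : ∀ e : String × String, e ∈ u ++ v ↔ e ∈ network := by
    intro e; rw [← hs]; exact PySem.List.mem_sorted network _ true e
  constructor
  · rintro ⟨e, he, ⟨h1, rfl⟩ | ⟨_, h2, rfl⟩⟩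
    · left
      have : e ∈ network := (hmemuv e).mp (List.mem_append_left _ he)
      have he' : e = (pp, e.2) := Prod.ext h1 rfl
      rwa [← he']
    · right
      have : e ∈ network := (hmemuv e).mp (List.mem_append_left _ he)
      have he' : e = (e.1, pp) := Prod.ext rfl h2
      rwa [← he']
  · rintro (h | h)
    · have : (pp, i) ∈ u ++ v := (hmemuv _).mpr h
      rcases List.mem_append.mp this with hmu | hmv
      · exact ⟨(pp, i), hmu, Or.inl ⟨rfl, rfl⟩⟩
      · exact absurd rfl (hv _ hmv).1
    · have : (i, pp) ∈ u ++ v := (hmemuv _).mpr h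
      rcases List.mem_append.mp this with hmu | hmv
      · by_cases hip : i = pp
        · exact ⟨(i, pp), hmu, Or.inl ⟨hip, hip⟩⟩
        · exact ⟨(i, pp), hmu, Or.inr ⟨hip, rfl, rfl⟩⟩
      · exact absurd rfl (hv _ hmv).2

-- membership in ∃-over-v equals ∃-over-network restricted to non-pp edges
lemma pvNonpp_exists_iff (network : List (String × String)) (pp : String)
    (u v : List (String × String)) (hs : pvSortedA network pp = u ++ v)
    (hu : ∀ e ∈ u, e.1 = pp ∨ e.2 = pp) (hv : ∀ e ∈ v, e.1 ≠ pp ∧ e.2 ≠ pp)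
    (P : (String × String) → Prop) :
    (∃ e ∈ v, P e) ↔ ∃ e ∈ network, (e.1 ≠ pp ∧ e.2 ≠ pp) ∧ P e := by
  have hmemuv : ∀ e : String × String, e ∈ u ++ v ↔ e ∈ network := by
    intro e; rw [← hs]; exact PySem.List.mem_sorted network _ true e
  constructor
  · rintro ⟨e, he, hp⟩
    exact ⟨e, (hmemuv e).mp (List.mem_append_right _ he), hv e he, hp⟩
  · rintro ⟨e, he, hnp, hp⟩
    rcases List.mem_append.mp ((hmemuv e).mpr he) with hmu | hmv
    · rcases hu e hmu with h | h
      · exact absurd h hnp.1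
      · exact absurd h hnp.2
    · exact ⟨e, hmv, hp⟩

-- one full pass of A at depth d ≥ 2, assuming tree[1] already holds all neighbours of pp
lemma pvPass (network : List (String × String)) (pp : String) (d : Nat) (hd : 2 ≤ d)
    (T : List (List String)) (hT : d + 1 < T.length)
    (Hpartner : ∀ x, pvAdjRel network pp x → x ∈ T.getD 1 []) :
    ((pvSortedA network pp).foldl (pvStepD pp (d : Int)) T).length = T.length ∧
    (∀ j, j ≠ 1 → j ≠ d + 1 →
      ((pvSortedA network pp).foldl (pvStepD pp (d : Int)) T).getD j [] = T.getD j []) ∧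
    (∀ i, i ∈ ((pvSortedA network pp).foldl (pvStepD pp (d : Int)) T).getD 1 [] ↔ i ∈ T.getD 1 []) ∧
    (∀ i, i ∈ ((pvSortedA network pp).foldl (pvStepD pp (d : Int)) T).getD (d + 1) [] ↔
      i ∈ T.getD (d + 1) [] ∨ ∃ e ∈ network, (e.1 ≠ pp ∧ e.2 ≠ pp) ∧
        ((e.1 ∈ T.getD d [] ∧ e.2 ∉ (T.take d).flatten ∧ i = e.2) ∨
         (¬(e.1 ∈ T.getD d [] ∧ e.2 ∉ (T.take d).flatten) ∧
           e.2 ∈ T.getD d [] ∧ e.1 ∉ (T.take d).flatten ∧ i = e.1))) := by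
  obtain ⟨u, v, hs, hu, hv⟩ := pvSorted_split network pp
  have h1len : 1 < T.length := by omega
  obtain ⟨extu, hufold, humem⟩ := pvStepD_fold_pp pp d (by omega) u hu T h1len
  rw [hs, List.foldl_append, hufold]
  set U := T.set 1 (T.getD 1 [] ++ extu) with hU
  have hUlen : U.length = T.length := by rw [hU, List.length_set]
  have hU1 : U.getD 1 [] = T.getD 1 [] ++ extu := pvGetD_set_self _ _ _ h1len
  have hUj : ∀ j, j ≠ 1 → U.getD j [] = T.getD j [] := fun j hj => pvGetD_set_ne _ _ _ _ (fun h => hj h.symm)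
  have hextu : ∀ x ∈ extu, pvAdjRel network pp x := by
    intro x hx
    exact (pvTouch_iff network pp u v hs hu hv x).mp ((humem x).mp hx)
  have hU1mem : ∀ i, i ∈ U.getD 1 [] ↔ i ∈ T.getD 1 [] := by
    intro i
    rw [hU1, List.mem_append]
    exact ⟨fun h => h.elim id (fun h => Hpartner i (hextu i h)), Or.inl⟩
  have hUd : U.getD d [] = T.getD d [] := hUj d (by omega)
  have hUtake : ∀ i : String, i ∈ (U.take d).flatten ↔ i ∈ (T.take d).flatten := by
    intro i
    rw [pvMem_take_flatten, pvMem_take_flatten]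
    constructor
    · rintro ⟨j, hj, hm⟩
      by_cases hj1 : j = 1
      · subst hj1
        exact ⟨1, hj, (hU1mem i).mp hm⟩
      · exact ⟨j, hj, by rwa [hUj j hj1] at hm⟩
    · rintro ⟨j, hj, hm⟩
      by_cases hj1 : j = 1
      · subst hj1
        exact ⟨1, hj, (hU1mem i).mpr hm⟩
      · exact ⟨j, hj, by rwa [hUj j hj1]⟩
  obtain ⟨extv, hvfold, hvmem⟩ := pvStepD_fold_nonpp pp d (by omega) v hv U (by omega)
  rw [hvfold]
  have hd1ne : d + 1 ≠ 1 := by omega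
  refine ⟨?_, ?_, ?_, ?_⟩
  · rw [List.length_set, hUlen]
  · intro j hj1 hjd
    rw [pvGetD_set_ne _ _ _ _ (fun h => hjd h.symm), hUj j hj1]
  · intro i
    rw [pvGetD_set_ne _ _ _ _ (fun h => hd1ne h), hU1mem]
  · intro i
    rw [pvGetD_set_self _ _ _ (by omega), List.mem_append]
    have hUd1 : U.getD (d + 1) [] = T.getD (d + 1) [] := hUj (d + 1) hd1ne
    rw [hUd1]
    have hvm := hvmem i
    rw [hUd] at hvm
    constructor
    · rintro (h | h)
      · exact Or.inl h
      · right
        obtain ⟨e, he, hc⟩ := hvm.mp h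
        refine (pvNonpp_exists_iff network pp u v hs hu hv _).mp ⟨e, he, ?_⟩
        rcases hc with ⟨a, b, c⟩ | ⟨a, b, c, dd⟩
        · exact Or.inl ⟨a, fun hm => b ((hUtake e.2).mpr hm), c⟩
        · refine Or.inr ⟨?_, b, fun hm => c ((hUtake e.1).mpr hm), dd⟩
          intro ⟨x, y⟩
          exact a ⟨x, fun hm => y ((hUtake e.2).mp hm)⟩
    · rintro (h | h)
      · exact Or.inl h
      · right
        obtain ⟨e, he, hc⟩ := (pvNonpp_exists_iff network pp u v hs hu hv _).mpr h
        refine hvm.mpr ⟨e, he, ?_⟩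
        rcases hc with ⟨a, b, c⟩ | ⟨a, b, c, dd⟩
        · exact Or.inl ⟨a, fun hm => b ((hUtake e.2).mp hm), c⟩
        · refine Or.inr ⟨?_, b, fun hm => c ((hUtake e.1).mp hm), dd⟩
          intro ⟨x, y⟩
          exact a ⟨x, fun hm => y ((hUtake e.2).mpr hm)⟩

lemma pvBall_zero_iff (network : List (String × String)) (pp i : String) :
    pvBall network pp 0 i ↔ i = pp := Iff.rfl

lemma pvBall_succ_iff (network : List (String × String)) (pp i : String) (n : Nat) :
    pvBall network pp (n + 1) i ↔
      pvBall network pp n i ∨ ∃ j, pvBall network pp n j ∧ pvAdjRel network j i := Iff.rfl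

lemma pvT0_len (pp : String) (m : Nat) : ([[pp]] ++ List.replicate m ([] : List String)).length = m + 1 := by
  simp

lemma pvT0_getD_pos (pp : String) (m : Nat) (j : Nat) (hj : 1 ≤ j) :
    ([[pp]] ++ List.replicate m ([] : List String)).getD j [] = [] := by
  cases j with
  | zero => omega
  | succ j =>
    show (([pp] : List String) :: List.replicate m []).getD (j + 1) [] = []
    rw [List.getD_cons_succ]
    rw [List.getD_eq_getElem?_getD, List.getElem?_replicate]
    split <;> rfl

def pvPassFold (network : List (String × String)) (pp : String) (m n : Nat) : List (List String) :=
  (PySem.List.pyRange 1 ((n : Int) + 1) 1).foldl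
    (fun t depth => (pvSortedA network pp).foldl (pvStepD pp depth) t)
    ([[pp]] ++ List.replicate m [])

lemma pvPassFold_one (network : List (String × String)) (pp : String) (m : Nat) :
    pvPassFold network pp m 1 =
      (pvSortedA network pp).foldl (pvStepD pp ((1 : Nat) : Int)) ([[pp]] ++ List.replicate m []) := by
  rw [pvPassFold]
  rw [show ((1 : Nat) : Int) + 1 = 1 + 1 from rfl]
  rw [PySem.List.pyRange_one_singleton 1]
  rw [List.foldl_cons, List.foldl_nil]
  rfl

lemma pvPassFold_succ (network : List (String × String)) (pp : String) (m n : Nat) :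
    pvPassFold network pp m (n + 1) =
      (pvSortedA network pp).foldl (pvStepD pp ((n + 1 : Nat) : Int)) (pvPassFold network pp m n) := by
  rw [pvPassFold, pvPassFold]
  rw [show ((n + 1 : Nat) : Int) + 1 = ((n : Int) + 1) + 1 by push_cast; ring]
  rw [PySem.List.pyRange_one_succ_right (show (1 : Int) ≤ (n : Int) + 1 by omega)]
  rw [List.foldl_append, List.foldl_cons, List.foldl_nil, pvCast_succ]

lemma pvInv (network : List (String × String)) (pp : String) (m : Nat) (hm : 2 ≤ m) :
    ∀ n : Nat, 1 ≤ n → n ≤ m - 1 →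
      (pvPassFold network pp m n).length = m + 1 ∧
      (∀ i, i ∈ (pvPassFold network pp m n).getD 0 [] ↔ i = pp) ∧
      (∀ i, i ∈ (pvPassFold network pp m n).getD 1 [] ↔ pvAdjRel network pp i) ∧
      (∀ j i, i ∈ (pvPassFold network pp m n).getD j [] → pvBall network pp j i) ∧
      (∀ i, pvBall network pp (n + 1) i → ∃ j, j ≤ n + 1 ∧ i ∈ (pvPassFold network pp m n).getD j []) ∧
      (∀ j, n + 2 ≤ j → (pvPassFold network pp m n).getD j [] = []) := by
  intro n
  induction n with
  | zero => intro h; omega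
  | succ n ih =>
    intro _ hnm
    rcases Nat.eq_zero_or_pos n with rfl | hn1
    · -- base case: the first pass, at depth 1
      clear ih
      obtain ⟨u, v, hs, hu, hv⟩ := pvSorted_split network pp
      set T0 : List (List String) := [[pp]] ++ List.replicate m [] with hT0
      have hT0len : T0.length = m + 1 := pvT0_len pp m
      have h1len : 1 < T0.length := by omega
      obtain ⟨extu, hufold, humem⟩ := pvStepD_fold_pp pp 1 le_rfl u hu T0 h1len
      have hT0g1 : T0.getD 1 [] = [] := pvT0_getD_pos pp m 1 le_rfl
      rw [hT0g1, List.nil_append] at hufold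
      set U := T0.set 1 extu with hUdef
      have hUlen : U.length = m + 1 := by rw [hUdef, List.length_set, hT0len]
      have hU1 : U.getD 1 [] = extu := pvGetD_set_self _ _ _ h1len
      have hUj : ∀ j, j ≠ 1 → U.getD j [] = T0.getD j [] :=
        fun j hj => pvGetD_set_ne _ _ _ _ (fun h => hj h.symm)
      have hextu : ∀ i, i ∈ extu ↔ pvAdjRel network pp i := by
        intro i
        rw [humem i]
        exact pvTouch_iff network pp u v hs hu hv i
      obtain ⟨extv, hvfold, hvmem⟩ := pvStepD_fold_nonpp pp 1 le_rfl v hv U (by omega)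
      simp only [show (1 : Nat) + 1 = 2 from rfl] at hvfold hvmem
      have hUg2 : U.getD 2 [] = [] := by rw [hUj 2 (by omega)]; exact pvT0_getD_pos pp m 2 (by omega)
      rw [hUg2, List.nil_append] at hvfold
      have hUtake : (U.take 1).flatten = [pp] := by
        rw [hUdef, List.take_set_of_le le_rfl, hT0]
        rfl
      rw [hU1, hUtake] at hvmem
      have hW : pvPassFold network pp m 1 = U.set 2 extv := by
        rw [pvPassFold_one, hs, List.foldl_append, hufold, hvfold]
      have hWg : ∀ j, j ≠ 2 → (pvPassFold network pp m 1).getD j [] = U.getD j [] := by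
        intro j hj
        rw [hW]; exact pvGetD_set_ne _ _ _ _ (fun h => hj h.symm)
      have hWg2 : (pvPassFold network pp m 1).getD 2 [] = extv := by
        rw [hW]; exact pvGetD_set_self _ _ _ (by omega)
      have hWg0 : (pvPassFold network pp m 1).getD 0 [] = [pp] := by
        rw [hWg 0 (by omega), hUj 0 (by omega)]; rfl
      have hWg1 : ∀ i, i ∈ (pvPassFold network pp m 1).getD 1 [] ↔ pvAdjRel network pp i := by
        intro i; rw [hWg 1 (by omega), hU1, hextu]
      have hmemv : ∀ e, e ∈ v → e ∈ network := by
        intro e he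
        have : e ∈ u ++ v := List.mem_append_right _ he
        rw [← hs] at this
        exact (PySem.List.mem_sorted network _ true e).mp this
      refine ⟨by rw [hW, List.length_set, hUlen], ?_, hWg1, ?_, ?_, ?_⟩
      · intro i; rw [hWg0]; exact List.mem_singleton
      · -- (i3)
        intro j i hi
        match j, hi with
        | 0, hi =>
          rw [hWg0] at hi
          exact List.mem_singleton.mp hi
        | 1, hi =>
          rw [hWg1 i] at hi
          exact Or.inr ⟨pp, rfl, hi⟩
        | 2, hi =>
          rw [hWg2] at hi
          obtain ⟨e, he, hc⟩ := (hvmem i).mp hi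
          have henet := hmemv e he
          rcases hc with ⟨ha, _, rfl⟩ | ⟨_, ha, _, rfl⟩
          · refine Or.inr ⟨e.1, Or.inr ⟨pp, rfl, (hextu e.1).mp ha⟩, Or.inl ?_⟩
            rwa [show (e.1, e.2) = e from rfl]
          · refine Or.inr ⟨e.2, Or.inr ⟨pp, rfl, (hextu e.2).mp ha⟩, Or.inr ?_⟩
            rwa [show (e.1, e.2) = e from rfl]
        | (j + 3), hi =>
          rw [hWg (j + 3) (by omega), hUj (j + 3) (by omega), pvT0_getD_pos pp m (j + 3) (by omega)] at hi
          cases hi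
      · -- (i4)
        intro i hb
        rcases (pvBall_succ_iff network pp i 1).mp hb with hb1 | ⟨j0, hbj0, hadj⟩
        · rcases (pvBall_succ_iff network pp i 0).mp hb1 with hb0 | ⟨j0, hbj0, hadj⟩
          · exact ⟨0, by omega, by rw [hWg0]; exact List.mem_singleton.mpr hb0⟩
          · rw [show j0 = pp from hbj0] at hadj
            exact ⟨1, by omega, (hWg1 i).mpr hadj⟩
        · by_cases hip : i = pp
          · exact ⟨0, by omega, by rw [hWg0]; exact List.mem_singleton.mpr hip⟩
          by_cases hadji : pvAdjRel network pp i
          · exact ⟨1, by omega, (hWg1 i).mpr hadji⟩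
          rcases (pvBall_succ_iff network pp j0 0).mp hbj0 with hj0pp | ⟨j1, hbj1, hadj1⟩
          · rw [show j0 = pp from hj0pp] at hadj
            exact absurd hadj hadji
          have hadj1' : pvAdjRel network pp j0 := by
            rw [← (show j1 = pp from hbj1)]; exact hadj1
          -- j0 is a neighbour of pp, i is a neighbour of j0, i ∉ {pp} ∪ N(pp)
          have hj0ne : j0 ≠ pp := by
            rintro rfl
            exact hadji hadj
          have hmemuv : ∀ e : String × String, e ∈ u ++ v ↔ e ∈ network := by
            intro e; rw [← hs]; exact PySem.List.mem_sorted network _ true e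
          have hnotpp : ∀ x, x ∈ ([pp] : List String) → x = pp := by simp
          rcases hadj with hε | hε
          · -- (j0, i) ∈ network
            rcases List.mem_append.mp ((hmemuv (j0, i)).mpr hε) with hmu | hmv
            · rcases hu _ hmu with h | h
              · have h' : j0 = pp := h
                subst h'
                exact absurd (Or.inl hε) hadji
              · exact absurd (show i = pp from h) hip
            · refine ⟨2, by omega, ?_⟩
              rw [hWg2]
              exact (hvmem i).mpr ⟨(j0, i), hmv,
                Or.inl ⟨(hextu j0).mpr hadj1', fun hm => hip (hnotpp i hm), rfl⟩⟩
          · -- (i, j0) ∈ network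
            rcases List.mem_append.mp ((hmemuv (i, j0)).mpr hε) with hmu | hmv
            · rcases hu _ hmu with h | h
              · exact absurd (show i = pp from h) hip
              · have h' : j0 = pp := h
                subst h'
                exact absurd (Or.inr hε) hadji
            · refine ⟨2, by omega, ?_⟩
              rw [hWg2]
              by_cases hc1 : i ∈ extu ∧ j0 ∉ ([pp] : List String)
              · exact absurd ((hextu i).mp hc1.1) hadji
              · exact (hvmem i).mpr ⟨(i, j0), hmv,
                  Or.inr ⟨hc1, (hextu j0).mpr hadj1', fun hm => hip (hnotpp i hm), rfl⟩⟩
      · -- (i5)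
        intro j hj
        rw [hWg j (by omega), hUj j (by omega)]
        exact pvT0_getD_pos pp m j (by omega)
    · -- inductive step: pass at depth n + 1 ≥ 2
      obtain ⟨ihlen, ih0, ih1, ih3, ih4, ih5⟩ := ih hn1 (by omega)
      set T := pvPassFold network pp m n with hTdef
      set d : Nat := n + 1 with hddef
      have hdpass := pvPass network pp d (by omega) T (by omega)
        (fun x hx => (ih1 x).mpr hx)
      obtain ⟨plen, pne, p1, pd1⟩ := hdpass
      have hWdef : pvPassFold network pp m (n + 1) =
          (pvSortedA network pp).foldl (pvStepD pp (d : Int)) T := pvPassFold_succ network pp m n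
      rw [hWdef]
      have hTd1nil : T.getD (d + 1) [] = [] := ih5 (d + 1) (by omega)
      refine ⟨by rw [plen, ihlen], ?_, ?_, ?_, ?_, ?_⟩
      · intro i; rw [pne 0 (by omega) (by omega)]; exact ih0 i
      · intro i; rw [p1 i]; exact ih1 i
      · -- (i3)
        intro j i hi
        by_cases hj1 : j = 1
        · subst hj1
          rw [p1 i] at hi
          exact ih3 1 i hi
        by_cases hjd : j = d + 1
        · subst hjd
          rw [pd1 i] at hi
          rcases hi with hi | ⟨e, he, _, hc⟩
          · exact ih3 (d + 1) i hi
          · rcases hc with ⟨ha, _, rfl⟩ | ⟨_, ha, _, rfl⟩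
            · exact Or.inr ⟨e.1, ih3 d e.1 ha, Or.inl (by rwa [show (e.1, e.2) = e from rfl])⟩
            · exact Or.inr ⟨e.2, ih3 d e.2 ha, Or.inr (by rwa [show (e.1, e.2) = e from rfl])⟩
        · rw [pne j hj1 hjd] at hi
          exact ih3 j i hi
      · -- (i4)
        intro i hb
        rcases (pvBall_succ_iff network pp i (n + 1)).mp hb with hb1 | ⟨j0, hbj0, hadj⟩
        · obtain ⟨j, hjle, hjm⟩ := ih4 i hb1
          refine ⟨j, by omega, ?_⟩
          by_cases hj1 : j = 1
          · subst hj1; exact (p1 i).mpr hjm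
          · rw [pne j hj1 (by omega)]; exact hjm
        · by_cases hbni : pvBall network pp (n + 1) i
          · obtain ⟨j, hjle, hjm⟩ := ih4 i hbni
            refine ⟨j, by omega, ?_⟩
            by_cases hj1 : j = 1
            · subst hj1; exact (p1 i).mpr hjm
            · rw [pne j hj1 (by omega)]; exact hjm
          obtain ⟨j', hj'le, hj'm⟩ := ih4 j0 hbj0
          have hj'eq : j' = n + 1 := by
            by_contra hne
            have hj'n : j' ≤ n := by omega
            have : pvBall network pp j' j0 := ih3 j' j0 hj'm
            exact hbni (Or.inr ⟨j0, pvBall_mono hj'n this, hadj⟩)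
          subst hj'eq
          have hj0d : j0 ∈ T.getD d [] := hj'm
          have hitake : i ∉ (T.take d).flatten := by
            intro hm
            obtain ⟨j'', hj''lt, hj''m⟩ := (pvMem_take_flatten T d i).mp hm
            have : pvBall network pp j'' i := ih3 j'' i hj''m
            exact hbni (pvBall_mono (by omega) this)
          have hj0ne : j0 ≠ pp := by
            intro heq
            rw [heq] at hadj
            exact hbni (pvBall_mono (by omega : 1 ≤ n + 1)
              ((pvBall_succ_iff network pp i 0).mpr (Or.inr ⟨pp, rfl, hadj⟩)))
          have hine : i ≠ pp := by
            intro heq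
            exact hbni (pvBall_mono (Nat.zero_le (n + 1)) heq)
          rcases hadj with hε | hε
          · refine ⟨d + 1, by omega, ?_⟩
            rw [pd1 i]
            exact Or.inr ⟨(j0, i), hε, ⟨hj0ne, hine⟩, Or.inl ⟨hj0d, hitake, rfl⟩⟩
          · by_cases hc1 : i ∈ T.getD d [] ∧ j0 ∉ (T.take d).flatten
            · refine ⟨d, by omega, ?_⟩
              rw [pne d (by omega) (by omega)]
              exact hc1.1
            · refine ⟨d + 1, by omega, ?_⟩
              rw [pd1 i]
              exact Or.inr ⟨(i, j0), hε, ⟨hine, hj0ne⟩, Or.inr ⟨hc1, hj0d, hitake, rfl⟩⟩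
      · -- (i5)
        intro j hj
        rw [pne j (by omega) (by omega)]
        exact ih5 j (by omega)

-- the per-plant tree of A, flattened, is exactly the radius-k ball (k ≥ 1)
lemma pvTreeA_mem (network : List (String × String)) (pp : String) (k : Int) (hk : 1 ≤ k) (i : String) :
    i ∈ (pvTreeA network pp k).flatten ↔ pvBall network pp k.toNat i := by
  by_cases hk1 : k = 1
  · subst hk1
    rw [pvTreeA]
    rw [if_neg (by decide), if_pos (by decide)]
    rw [show PySem.List.pyRange 0 1 1 = [0] from PySem.List.pyRange_one_singleton 0]
    rw [show ([0] : List Int).map (fun _ => ([] : List String)) = [[]] from rfl]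
    obtain ⟨L', hfold, hmem⟩ := pvStep1_fold pp (pvSortedA network pp) []
    rw [show ([[pp]] ++ [[]] : List (List String)) = [[pp], []] from rfl, hfold]
    have hflat : ∀ x, x ∈ ([[pp], L'] : List (List String)).flatten ↔ x = pp ∨ x ∈ L' := by
      intro x; simp
    rw [hflat]
    have hLiff : i ∈ L' ↔ pvAdjRel network pp i := by
      rw [hmem i]
      simp only [List.not_mem_nil, false_or]
      constructor
      · rintro ⟨e, he, ⟨h1, rfl⟩ | ⟨h2, rfl⟩⟩
        · left
          have henet := (PySem.List.mem_sorted network _ true e).mp he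
          rwa [show e = (pp, e.2) from Prod.ext h1 rfl] at henet
        · right
          have henet := (PySem.List.mem_sorted network _ true e).mp he
          rwa [show e = (e.1, pp) from Prod.ext rfl h2] at henet
      · rintro (h | h)
        · exact ⟨(pp, i), (PySem.List.mem_sorted network _ true _).mpr h, Or.inl ⟨rfl, rfl⟩⟩
        · exact ⟨(i, pp), (PySem.List.mem_sorted network _ true _).mpr h, Or.inr ⟨rfl, rfl⟩⟩
    rw [hLiff]
    rw [show (1 : Int).toNat = 1 from rfl, pvBall_succ_iff]
    constructor
    · rintro (h | h)
      · exact Or.inl h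
      · exact Or.inr ⟨pp, rfl, h⟩
    · rintro (h | ⟨j, hj, hadj⟩)
      · exact Or.inl h
      · rcases (pvBall_zero_iff network pp j).mp hj with rfl
        exact Or.inr hadj
  · -- k ≥ 2
    have hk2 : 2 ≤ k := by omega
    set m : Nat := k.toNat with hmdef
    have hm2 : 2 ≤ m := by omega
    have hkm : k = (m : Int) := by omega
    have hinit : [[pp]] ++ (PySem.List.pyRange 0 k 1).map (fun _ => ([] : List String)) =
        [[pp]] ++ List.replicate m [] := by
      congr 1
      rw [List.eq_replicate_iff]
      constructor
      · rw [List.length_map, PySem.List.length_pyRange_one]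
        omega
      · intro b hb
        obtain ⟨_, _, hb'⟩ := List.mem_map.mp hb
        exact hb'.symm
    have htree : pvTreeA network pp k = pvPassFold network pp m (m - 1) := by
      rw [pvTreeA, if_neg (by simp; omega), if_neg (by simp; omega), pvPassFold, hinit]
      rw [show ((m - 1 : Nat) : Int) + 1 = k by omega]
    rw [htree]
    obtain ⟨ilen, i0, i1, i3, i4, i5⟩ := pvInv network pp m hm2 (m - 1) (by omega) le_rfl
    rw [pvMem_flatten_getD]
    constructor
    · rintro ⟨j, hj⟩
      by_cases hjm : j ≤ m
      · exact pvBall_mono hjm (i3 j i hj)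
      · rw [i5 j (by omega)] at hj
        cases hj
    · intro hb
      have hb' : pvBall network pp (m - 1 + 1) i := by rwa [show m - 1 + 1 = m by omega]
      obtain ⟨j, _, hjm⟩ := i4 i hb'
      exact ⟨j, hjm⟩

lemma pvTreeA_zero (network : List (String × String)) (pp : String) :
    pvTreeA network pp 0 = [] := by
  rw [pvTreeA, if_pos (by decide)]

lemma pvTreeA_neg (network : List (String × String)) (pp : String) (k : Int) (hk : k < 0) :
    pvTreeA network pp k = [[pp]] := by
  rw [pvTreeA, if_neg (by simp; omega), if_neg (by simp; omega)]
  rw [PySem.List.pyRange_one_eq_nil (by omega : (k : Int) ≤ 1)]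
  rw [PySem.List.pyRange_one_eq_nil (by omega : (k : Int) ≤ 0)]
  rfl

lemma pvDictGetD_of_mem_nodup (pps : List (String × Int)) (pp : String) (k : Int)
    (hmem : (pp, k) ∈ pps) (hnd : (pps.map (fun p => p.1)).Nodup) :
    PySem.Dict.getD ⟨pps⟩ pp 0 = k := by
  induction pps with
  | nil => cases hmem
  | cons q rest ih =>
    rcases List.mem_cons.mp hmem with h | h
    · subst h
      simp [PySem.Dict.getD, PySem.Dict.get?]
    · have hne : q.1 ≠ pp := by
        intro he
        have : pp ∈ rest.map (fun p => p.1) := List.mem_map.mpr ⟨(pp, k), h, rfl⟩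
        rw [List.map_cons, List.nodup_cons] at hnd
        exact hnd.1 (he ▸ this)
      have hnd' : (rest.map (fun p => p.1)).Nodup := by
        rw [List.map_cons, List.nodup_cons] at hnd; exact hnd.2
      have := ih h hnd'
      simpa [PySem.Dict.getD, PySem.Dict.get?, List.find?_cons, hne] using this

lemma pvDictContains_iff (pps : List (String × Int)) (i : String) :
    PySem.Dict.contains (⟨pps⟩ : PySem.Dict String Int) i = true ↔ i ∈ pps.map (fun p => p.1) := by
  simp [PySem.Dict.contains, List.any_eq_true, List.mem_map, beq_iff_eq]

-- node x is reachable by some plant of the dict, or is a plant key: common to both ports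
lemma pvCore (network : List (String × String)) (power_plants : List (String × Int))
    (hnd : (power_plants.map (fun p => p.1)).Nodup) (i : String) :
    (i ∈ ((power_plants.map (fun p => p.1)).map (fun pp => PySem.Set.ofList
        ((pvTreeA network pp (PySem.Dict.getD ⟨power_plants⟩ pp 0)).flatten.filter
          (fun x => !((power_plants.map (fun p => p.1)).contains x))))).flatten
      ∨ i ∈ power_plants.map (fun p => p.1))
    ↔ (i ∈ power_plants.foldl
          (fun pow pk => PySem.Set.union pow (pvBfsB (pvAdjB network) pk.1 pk.2)) PySem.Set.empty
      ∨ i ∈ power_plants.map (fun p => p.1)) := by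
  set keys := power_plants.map (fun p => p.1) with hkeys
  have hsup : ∀ x : String,
      x ∈ (keys.map (fun pp => PySem.Set.ofList
        ((pvTreeA network pp (PySem.Dict.getD ⟨power_plants⟩ pp 0)).flatten.filter
          (fun y => !(keys.contains y))))).flatten
      ↔ ∃ pk ∈ power_plants,
          x ∈ (pvTreeA network pk.1 (PySem.Dict.getD ⟨power_plants⟩ pk.1 0)).flatten ∧ x ∉ keys := by
    intro x
    rw [List.mem_flatten]
    constructor
    · rintro ⟨l, hl, hx⟩
      obtain ⟨pp, hppk, rfl⟩ := List.mem_map.mp hl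
      rw [PySem.Set.mem_ofList, List.mem_filter] at hx
      obtain ⟨pk, hpk, rfl⟩ := List.mem_map.mp hppk
      refine ⟨pk, hpk, hx.1, ?_⟩
      intro hm
      rw [List.contains_iff_mem.mpr hm] at hx
      exact absurd hx.2 (by decide)
    · rintro ⟨pk, hpk, hx, hnk⟩
      refine ⟨_, List.mem_map.mpr ⟨pk.1, List.mem_map.mpr ⟨pk, hpk, rfl⟩, rfl⟩, ?_⟩
      rw [PySem.Set.mem_ofList, List.mem_filter]
      refine ⟨hx, ?_⟩
      rw [Bool.not_eq_eq_eq_not, Bool.not_true, Bool.eq_false_iff]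
      intro hc
      exact hnk (List.contains_iff_mem.mp hc)
  rw [hsup i, pvPowered_mem]
  constructor
  · rintro (⟨pk, hpk, htree, hnk⟩ | hk)
    · left
      have hget : PySem.Dict.getD (⟨power_plants⟩ : PySem.Dict String Int) pk.1 0 = pk.2 := by
        have : (pk.1, pk.2) ∈ power_plants := by rw [Prod.mk.eta]; exact hpk
        exact pvDictGetD_of_mem_nodup power_plants pk.1 pk.2 this hnd
      rw [hget] at htree
      rcases lt_trichotomy pk.2 0 with hneg | hzero | hpos
      · rw [pvTreeA_neg network pk.1 pk.2 hneg] at htree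
        have : i = pk.1 := by simpa using htree
        exact absurd (this ▸ List.mem_map.mpr ⟨pk, hpk, rfl⟩) hnk
      · rw [hzero, pvTreeA_zero] at htree
        cases htree
      · exact ⟨pk, hpk, (pvTreeA_mem network pk.1 pk.2 (by omega) i).mp htree⟩
    · exact Or.inr hk
  · rintro (⟨pk, hpk, hball⟩ | hk)
    · by_cases hik : i ∈ keys
      · exact Or.inr hik
      · left
        have hget : PySem.Dict.getD (⟨power_plants⟩ : PySem.Dict String Int) pk.1 0 = pk.2 := by
          have : (pk.1, pk.2) ∈ power_plants := by rw [Prod.mk.eta]; exact hpk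
          exact pvDictGetD_of_mem_nodup power_plants pk.1 pk.2 this hnd
      
        by_cases hpos : 1 ≤ pk.2
        · refine ⟨pk, hpk, ?_, hik⟩
          rw [hget]
          exact (pvTreeA_mem network pk.1 pk.2 hpos i).mpr hball
        · have hz : pk.2.toNat = 0 := by omega
          rw [hz] at hball
          have : i = pk.1 := hball
          exact absurd (this ▸ List.mem_map.mpr ⟨pk, hpk, rfl⟩) hik
    · exact Or.inr hk

-- ===== VERDICT (by name: the statement is the Claim_ definition above) =====
theorem power_supply_spec : Claim_equal_power_supply := by
  intro network power_plants _ hpre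
  show power_supply network power_plants = power_supply_alt network power_plants
  have hnd : (power_plants.map (fun p => p.1)).Nodup := hpre
  simp only [power_supply, power_supply_alt, pvKeysA]
  rw [PySem.List.foldl_append_singleton_eq_map, List.nil_append]
  refine congrArg PySem.Set.ofList (List.filter_congr ?_)
  intro i _
  have hdec : ∀ a b c : Bool, (a = true ↔ (b || c) = true) → (!a) = (!b && !c) := by decide
  apply hdec
  rw [List.contains_iff_mem, List.mem_append, Bool.or_eq_true, PySem.Set.contains_iff,
    pvDictContains_iff]
  exact pvCore network power_plants hnd i
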